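-- pv_equiv track=rewrite | github.com/B0GDAN28/Top_250_IMDB | main.py | get_appearances_count_decade
-- ===== SOURCE A (Python) =====
-- def get_appearances_count_decade(list_movies_decades, list_unique_decades):
--     appearances_count = []
--     for i in list_unique_decades:
--         count = 0
--         for j in list_movies_decades:
--             if i == j:
--                 count = count + 1
--         appearances_count.append(count)
--     return appearances_count
-- ===== SOURCE B (Python) =====
-- def get_appearances_count_decade(list_movies_decades, list_unique_decades):
--     counts = {}
--     for j in list_movies_decades:
--         counts[j] = counts.get(j, 0) + 1
--     return [counts.get(i, 0) for i in list_unique_decades]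
-- ===== Notes on version B (the rewrite author's own statement) =====
-- stated objective: faster
-- what changed: Replaces the nested scan (one pass over list_movies_decades per unique decade) with a single-pass hash-table count followed by O(1) lookups per unique decade.
import Mathlib
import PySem

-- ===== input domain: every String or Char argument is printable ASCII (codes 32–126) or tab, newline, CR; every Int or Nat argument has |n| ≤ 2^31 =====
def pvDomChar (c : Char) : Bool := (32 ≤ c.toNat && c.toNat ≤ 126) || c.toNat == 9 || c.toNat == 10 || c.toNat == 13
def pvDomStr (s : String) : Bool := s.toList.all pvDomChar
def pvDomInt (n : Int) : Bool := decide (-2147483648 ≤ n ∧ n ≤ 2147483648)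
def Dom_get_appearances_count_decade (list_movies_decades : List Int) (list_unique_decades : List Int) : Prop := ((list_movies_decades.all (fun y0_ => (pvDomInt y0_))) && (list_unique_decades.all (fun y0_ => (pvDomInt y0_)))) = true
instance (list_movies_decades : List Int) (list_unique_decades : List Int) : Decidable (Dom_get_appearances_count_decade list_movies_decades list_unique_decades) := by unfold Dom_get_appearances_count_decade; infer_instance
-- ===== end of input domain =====

-- ===== PORT A =====
-- Header: B replaces A's nested scans with a one-pass dict count plus per-element lookup (faster, asymptotic).
def get_appearances_count_decade (list_movies_decades : List Int) (list_unique_decades : List Int) : List Int :=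
  list_unique_decades.foldl
    (fun appearances_count i =>
      appearances_count ++
        [list_movies_decades.foldl (fun count j => if i == j then count + 1 else count) 0])
    []

-- ===== PORT B =====
def get_appearances_count_decade_alt (list_movies_decades : List Int) (list_unique_decades : List Int) : List Int :=
  let counts : PySem.Dict Int Int :=
    list_movies_decades.foldl (fun d j => d.insert j (d.getD j 0 + 1)) PySem.Dict.empty
  list_unique_decades.map (fun i => counts.getD i 0)

-- ===== PRECONDITION & SPEC =====
def Spec_get_appearances_count_decade (list_movies_decades : List Int) (list_unique_decades : List Int) (out : List Int) : Prop := out = get_appearances_count_decade_alt list_movies_decades list_unique_decades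
instance (list_movies_decades : List Int) (list_unique_decades : List Int) (out : List Int) : Decidable (Spec_get_appearances_count_decade list_movies_decades list_unique_decades out) := by unfold Spec_get_appearances_count_decade; infer_instance

-- ===== CLAIM (what is proved, stated in full; the proofs are below) =====
def Claim_equal_get_appearances_count_decade : Prop := ∀ (list_movies_decades : List Int) (list_unique_decades : List Int), Dom_get_appearances_count_decade list_movies_decades list_unique_decades → Spec_get_appearances_count_decade list_movies_decades list_unique_decades (get_appearances_count_decade list_movies_decades list_unique_decades)

-- ===== LEMMAS AND PROOFS =====

-- ===== VERDICT (by name: the statement is the Claim_ definition above) =====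
theorem inner_count (m : List Int) (i : Int) :
    m.foldl (fun count j => if i == j then count + 1 else count) 0 = (m.count i : Int) := by
  have h : ∀ (c : Int), m.foldl (fun count j => if i == j then count + 1 else count) c
      = c + (m.count i : Int) := by
    induction m with
    | nil => intro c; simp
    | cons x xs ih =>
      intro c
      rw [List.foldl_cons, List.count_cons]
      cases hb : (i == x) with
      | true =>
        have hxi : (x == i) = true := by simp at hb ⊢; omega
        rw [if_pos rfl, ih]
        simp only [hxi]
        push_cast; ring
      | false =>
        have hxi : (x == i) = false := by simp at hb ⊢; omega
        rw [if_neg (by simp), ih]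
        simp only [hxi]
        simp
  simpa using h 0

theorem outer_foldl (m : List Int) (u : List Int) (acc : List Int) :
    u.foldl (fun a i => a ++ [m.foldl (fun count j => if i == j then count + 1 else count) 0]) acc
      = acc ++ u.map (fun i => (m.count i : Int)) := by
  induction u generalizing acc with
  | nil => simp
  | cons x xs ih =>
    rw [List.foldl_cons, ih, inner_count]
    simp

theorem get_appearances_count_decade_spec : Claim_equal_get_appearances_count_decade := by
  intro m u _
  unfold Spec_get_appearances_count_decade get_appearances_count_decade get_appearances_count_decade_alt
  rw [outer_foldl]
  simp [PySem.Dict.getD_foldl_insert_add_one]
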